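-- pv_equiv track=rewrite | github.com/darae07/study | algorithm/book_icote/43.어두운길.py | solution
-- ===== SOURCE A (Python) =====
-- def find(parent, x):
--     if parent[x] != x:
--         parent[x] = find(parent, parent[x])
--     return parent[x]
--
-- def union(parent, a, b):
--     a = find(parent, a)
--     b = find(parent, b)
--     if a < b:
--         parent[b] = a
--     else:
--         parent[a] = b
--
-- def solution(n, loads):
--     house = [i for i in range(n)]
--     result = 0
--
--     loads.sort(key=lambda s: s[2])
--     for load in loads:
--         x, y, z = load[0], load[1], load[2]
--
--         x = find(house, x)
--         y = find(house, y)
--         if x == y: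
--             result += z
--         else:
--             union(house, x, y)
--     return result
-- ===== SOURCE B (Python) =====
-- # Kruskal's cycle-edge sum via component relabelling: each vertex carries the label
-- # (minimum vertex) of its component; merging relabels the larger-label component.
-- # Sorts `loads` in place like the original.
-- def solution(n, loads):
--     loads.sort(key=lambda s: s[2])
--     label = list(range(n))
--     result = 0
--     for load in loads:
--         a, b, z = label[load[0]], label[load[1]], load[2]
--         if a == b:
--             result += z
--         else:
--             lo, hi = (a, b) if a < b else (b, a)
--             label = [lo if c == hi else c for c in label]
--     return result
-- ===== Notes on version B (the rewrite author's own statement) =====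
-- stated objective: alternative
-- what changed: Replaces the recursive path-compressing union-find with a flat component-label array: each vertex stores its component's minimum vertex and a merge relabels the whole array, so the cycle test is a single indexed lookup with no recursion; B keeps A's in-place sort of loads. Pre_ excludes only inputs where both programs raise IndexError/TypeError (negative n with edges, edges shorter than 3, vertex index outside [-n, n)).
import Mathlib
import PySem

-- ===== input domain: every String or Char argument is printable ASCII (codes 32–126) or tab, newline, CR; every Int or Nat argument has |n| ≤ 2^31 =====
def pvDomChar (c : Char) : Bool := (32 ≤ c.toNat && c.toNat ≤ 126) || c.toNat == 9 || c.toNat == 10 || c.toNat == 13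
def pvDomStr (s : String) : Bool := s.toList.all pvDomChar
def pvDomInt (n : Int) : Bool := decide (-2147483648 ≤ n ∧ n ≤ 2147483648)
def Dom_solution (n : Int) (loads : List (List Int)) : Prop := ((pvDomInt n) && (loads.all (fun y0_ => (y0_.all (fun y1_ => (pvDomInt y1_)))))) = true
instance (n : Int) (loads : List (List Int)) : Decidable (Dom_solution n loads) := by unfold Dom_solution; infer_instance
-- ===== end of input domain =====

-- B replaces A's recursive path-compressing union-find by a flat component-label
-- array (each vertex holds its component's minimum vertex; a merge relabels the array).
-- Both A and B sort `loads` in place (same observable mutation); the theorems below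
-- are about the return value only.

-- ===== PORT A =====
-- find(parent, x) with path compression; fuel bounds the recursion depth (under
-- Pre_ the parent chain is strictly decreasing, so the fuel never runs out);
-- none = IndexError.
def findA (fuel : Nat) (parent : List Int) (x : Int) : Option (List Int × Int) :=
  match fuel with
  | 0 => none
  | f+1 =>
    match PySem.List.pyGet? parent x with
    | none => none
    | some px =>
      if px ≠ x then
        match findA f parent px with
        | none => none
        | some (p1, r) =>
          match PySem.List.pySet? p1 x r with
          | none => none
          | some p2 =>
            match PySem.List.pyGet? p2 x with
            | none => none
            | some rx => some (p2, rx)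
      else some (parent, px)

-- union(parent, a, b)
def unionA (fuel : Nat) (parent : List Int) (a b : Int) : Option (List Int) :=
  match findA fuel parent a with
  | none => none
  | some (p1, a') =>
    match findA fuel p1 b with
    | none => none
    | some (p2, b') =>
      if a' < b' then PySem.List.pySet? p2 b' a'
      else PySem.List.pySet? p2 a' b'

-- the body of A's `for load in loads` loop
def stepA (st : Option (List Int × Int)) (load : List Int) : Option (List Int × Int) :=
  match st with
  | none => none
  | some (house, result) =>
    match PySem.List.pyGet? load 0, PySem.List.pyGet? load 1, PySem.List.pyGet? load 2 with
    | some x0, some y0, some z =>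
      match findA (house.length + 2) house x0 with
      | none => none
      | some (h1, x) =>
        match findA (h1.length + 2) h1 y0 with
        | none => none
        | some (h2, y) =>
          if x = y then some (h2, result + z)
          else
            match unionA (h2.length + 2) h2 x y with
            | none => none
            | some h3 => some (h3, result)
    | _, _, _ => none

def solution (n : Int) (loads : List (List Int)) : Int :=
  let house := PySem.List.pyRange 0 n 1
  let sl := PySem.List.sorted loads (fun s => PySem.List.pyGetD s 2 0) false
  match sl.foldl stepA (some (house, 0)) with
  | none => 0
  | some (_, result) => result

-- ===== PORT B =====
-- the body of B's loop: label lookup, cycle test, whole-array relabel on merge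
def stepB (st : Option (List Int × Int)) (load : List Int) : Option (List Int × Int) :=
  match st with
  | none => none
  | some (label, result) =>
    match PySem.List.pyGet? load 0, PySem.List.pyGet? load 1, PySem.List.pyGet? load 2 with
    | some i, some j, some z =>
      match PySem.List.pyGet? label i, PySem.List.pyGet? label j with
      | some a, some b =>
        if a = b then some (label, result + z)
        else
          let lo := if a < b then a else b
          let hi := if a < b then b else a
          some (label.map (fun c => if c = hi then lo else c), result)
      | _, _ => none
    | _, _, _ => none

def solution_alt (n : Int) (loads : List (List Int)) : Int :=
  let sl := PySem.List.sorted loads (fun s => PySem.List.pyGetD s 2 0) false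
  match sl.foldl stepB (some (PySem.List.pyRange 0 n 1, 0)) with
  | none => 0
  | some (_, result) => result

-- ===== PRECONDITION & SPEC =====
-- Pre_ excludes exactly the raising inputs: negative n with a nonempty edge list,
-- an edge with fewer than 3 entries (IndexError / TypeError in the sort key), or a
-- vertex index outside [-n, n) (IndexError); both programs raise on all of those.
def Pre_solution (n : Int) (loads : List (List Int)) : Prop :=
  (0 ≤ n ∨ loads = []) ∧
  ∀ l ∈ loads, 3 ≤ l.length ∧
    -n ≤ l.getD 0 0 ∧ l.getD 0 0 < n ∧ -n ≤ l.getD 1 0 ∧ l.getD 1 0 < n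

instance (n : Int) (loads : List (List Int)) : Decidable (Pre_solution n loads) := by
  unfold Pre_solution; infer_instance

def pvWitness_solution : Int × List (List Int) :=
  (3, [[0, 1, 7], [1, 2, 2], [0, 2, 3], [-1, 0, 5]])

def Spec_solution (n : Int) (loads : List (List Int)) (out : Int) : Prop := out = solution_alt n loads
instance (n : Int) (loads : List (List Int)) (out : Int) : Decidable (Spec_solution n loads out) := by unfold Spec_solution; infer_instance

-- ===== CLAIM (what is proved, stated in full; the proofs are below) =====
def Claim_equal_solution : Prop := ∀ (n : Int) (loads : List (List Int)), Dom_solution n loads → Pre_solution n loads → Spec_solution n loads (solution n loads)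

-- ===== LEMMAS AND PROOFS =====

def pvWF (h : List Int) : Prop := ∀ i, (hi : i < h.length) → 0 ≤ h[i] ∧ h[i] ≤ (i : Int)

def pvRootN (h : List Int) : Nat → Nat → Int
  | 0, i => (i : Int)
  | f+1, i =>
    if h.getD i (i : Int) = (i : Int) then (i : Int)
    else pvRootN h f (h.getD i (i : Int)).toNat

def pvRoot (h : List Int) (i : Nat) : Int := pvRootN h (i+1) i

def pvNidx (len : Nat) (x : Int) : Nat := (if x < 0 then x + len else x).toNat

lemma pvRootN_stable (h : List Int) (hw : pvWF h) :
    ∀ i, i < h.length → ∀ f g, i < f → i < g → pvRootN h f i = pvRootN h g i := by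
  intro i
  induction i using Nat.strong_induction_on with
  | _ i IH =>
    intro hi f g hf hg
    obtain ⟨f', rfl⟩ : ∃ f', f = f' + 1 := ⟨f - 1, by omega⟩
    obtain ⟨g', rfl⟩ : ∃ g', g = g' + 1 := ⟨g - 1, by omega⟩
    simp only [pvRootN]
    have hget : h.getD i (i : Int) = h[i] := by
      simp [List.getD_eq_getElem?_getD, hi]
    by_cases hfix : h.getD i (i : Int) = (i : Int)
    · rw [if_pos hfix, if_pos hfix]
    · have hb := hw i hi
      have hfix' := hfix
      rw [hget] at hfix'
      have hlt : (h[i]).toNat < i := by omega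
      rw [if_neg hfix, if_neg hfix, hget]
      exact IH _ hlt (by omega) f' g' (by omega) (by omega)

lemma pvRootN_eq_root (h : List Int) (hw : pvWF h) (i : Nat) (hi : i < h.length)
    (f : Nat) (hf : i < f) : pvRootN h f i = pvRoot h i :=
  pvRootN_stable h hw i hi f (i+1) hf (Nat.lt_succ_self i)

lemma pvRoot_unfold (h : List Int) (i : Nat) (hi : i < h.length) :
    pvRoot h i = if h[i] = (i : Int) then (i : Int) else pvRootN h i (h[i]).toNat := by
  have hget : h.getD i (i : Int) = h[i] := by
    simp [List.getD_eq_getElem?_getD, hi]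
  simp only [pvRoot, pvRootN, hget]

lemma pvRoot_spec (h : List Int) (hw : pvWF h) :
    ∀ i, i < h.length →
      0 ≤ pvRoot h i ∧ (pvRoot h i).toNat ≤ i ∧
      h.getD (pvRoot h i).toNat 0 = pvRoot h i := by
  intro i
  induction i using Nat.strong_induction_on with
  | _ i IH =>
    intro hi
    rw [pvRoot_unfold h i hi]
    by_cases hfix : h[i] = (i : Int)
    · rw [if_pos hfix]
      refine ⟨by positivity, by simp, ?_⟩
      simp [List.getD_eq_getElem?_getD, hi, hfix]
    · rw [if_neg hfix]
      have hb := hw i hi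
      have hlt : (h[i]).toNat < i := by omega
      rw [pvRootN_eq_root h hw _ (by omega) i hlt]
      have := IH _ hlt (by omega)
      exact ⟨this.1, by omega, this.2.2⟩

lemma pvRoot_fix (h : List Int) (i : Nat) (hi : i < h.length)
    (hfix : h[i] = (i : Int)) : pvRoot h i = (i : Int) := by
  unfold pvRoot pvRootN
  simp [List.getD_eq_getElem?_getD, hi, hfix]

lemma pvRoot_fixnat (h : List Int) (hw : pvWF h) (i : Nat) (hi : i < h.length) :
    pvRoot h (pvRoot h i).toNat = pvRoot h i := by
  obtain ⟨hr0, hrle, hrfix⟩ := pvRoot_spec h hw i hi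
  rw [pvRoot_unfold h _ (by omega)]
  have hge : h[(pvRoot h i).toNat]'(by omega) = pvRoot h i := by
    rwa [List.getD_eq_getElem?_getD, List.getElem?_eq_getElem (by omega)] at hrfix
  simp [hge, Int.toNat_of_nonneg hr0]

lemma pvSet_root (h : List Int) (hw : pvWF h) (i : Nat) (hi : i < h.length) :
    pvWF (h.set i (pvRoot h i)) ∧
    ∀ j, j < h.length → pvRoot (h.set i (pvRoot h i)) j = pvRoot h j := by
  obtain ⟨hr0, hrle, hrfix⟩ := pvRoot_spec h hw i hi
  set r := pvRoot h i with hrdef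
  have hw' : pvWF (h.set i r) := by
    intro j hj
    rw [List.length_set] at hj
    rw [List.getElem_set]
    by_cases hji : i = j
    · simp only [if_pos hji]
      exact ⟨hr0, by simp [← hji]; omega⟩
    · simp only [if_neg hji]; exact hw j hj
  refine ⟨hw', ?_⟩
  intro j
  induction j using Nat.strong_induction_on with
  | _ j IH =>
    intro hj
    have hj' : j < (h.set i r).length := by simpa using hj
    rw [pvRoot_unfold _ j hj', pvRoot_unfold h j hj, List.getElem_set]
    by_cases hji : i = j
    · subst hji
      simp only [if_true]
      have hrootr : pvRoot h r.toNat = r := hrdef ▸ pvRoot_fixnat h hw i hi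
      have hA : (if r = (i:Int) then (i:Int) else pvRootN (h.set i r) i r.toNat) = r := by
        by_cases hri : r = (i : Int)
        · simp [hri]
        · have hrlt : r.toNat < i := by omega
          rw [if_neg hri,
            pvRootN_eq_root _ hw' r.toNat (by simp; omega) i hrlt,
            IH r.toNat hrlt (by omega), hrootr]
      rw [hA]
      by_cases hfix : h[i] = (i : Int)
      · rw [if_pos hfix, hrdef, pvRoot_unfold h i hi, if_pos hfix]
      · rw [if_neg hfix, hrdef, pvRoot_unfold h i hi, if_neg hfix]
    · simp only [if_neg hji]
      by_cases hfix : h[j] = (j : Int)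
      · rw [if_pos hfix, if_pos hfix]
      · have hb := hw j hj
        have hlt : (h[j]).toNat < j := by omega
        rw [if_neg hfix, if_neg hfix,
          pvRootN_eq_root _ hw' _ (by simp; omega) j hlt,
          pvRootN_eq_root h hw _ (by omega) j hlt]
        exact IH _ hlt (by omega)

lemma pvSet_union (h : List Int) (hw : pvWF h) (lo hi : Nat) (hlh : lo < hi)
    (hhi : hi < h.length) (hflo : h[lo]'(by omega) = (lo : Int)) (hfhi : h[hi] = (hi : Int)) :
    pvWF (h.set hi (lo : Int)) ∧
    ∀ j, j < h.length → pvRoot (h.set hi (lo : Int)) j =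
      if pvRoot h j = (hi : Int) then (lo : Int) else pvRoot h j := by
  have hw' : pvWF (h.set hi (lo : Int)) := by
    intro j hj
    rw [List.length_set] at hj
    rw [List.getElem_set]
    by_cases hji : hi = j
    · simp only [if_pos hji]
      constructor
      · positivity
      · subst hji; exact_mod_cast le_of_lt hlh
    · simp only [if_neg hji]; exact hw j hj
  refine ⟨hw', ?_⟩
  intro j
  induction j using Nat.strong_induction_on with
  | _ j IH =>
    intro hj
    have hj' : j < (h.set hi (lo:Int)).length := by simpa using hj
    rw [pvRoot_unfold _ j hj', List.getElem_set]
    by_cases hji : hi = j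
    · subst hji
      simp only [if_true]
      have hlone : ¬ ((lo : Int) = (hi : Int)) := by exact_mod_cast Nat.ne_of_lt hlh
      rw [if_neg hlone]
      have hlolt : (lo : Int).toNat < hi := by simpa using hlh
      rw [pvRootN_eq_root _ hw' _ (by simp; omega) hi hlolt]
      rw [IH _ hlolt (by omega)]
      have hrlo : pvRoot h (lo:Int).toNat = (lo : Int) := by
        rw [pvRoot_unfold h _ (by simp; omega)]
        simp [hflo]
      rw [hrlo, if_neg hlone]
      have hrhi : pvRoot h hi = (hi : Int) := pvRoot_fix h hi hhi hfhi
      rw [hrhi, if_pos rfl]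
    · simp only [if_neg hji]
      rw [pvRoot_unfold h j hj]
      by_cases hfix : h[j] = (j : Int)
      · rw [if_pos hfix, if_pos hfix]
        have : ¬ ((j : Int) = (hi : Int)) := by
          intro hc; exact hji (by exact_mod_cast hc.symm)
        rw [if_neg this]
      · have hb := hw j hj
        have hlt : (h[j]).toNat < j := by omega
        rw [if_neg hfix, if_neg hfix,
          pvRootN_eq_root _ hw' _ (by simp; omega) j hlt,
          pvRootN_eq_root h hw _ (by omega) j hlt]
        exact IH _ hlt (by omega)

lemma pvPySet_neg (xs : List Int) (k : Nat) (v : Int) (h1 : 0 < k) (h2 : k ≤ xs.length) :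
    PySem.List.pySet? xs (-(k : Int)) v = some (xs.set (xs.length - k) v) := by
  simp only [PySem.List.pySet?, PySem.List.pyIdx?, Int.neg_nonneg, Int.natCast_nonpos_iff,
    Int.toNat_neg_natCast, neg_le_neg_iff, Nat.cast_le, neg_neg, Int.toNat_natCast,
    Option.map_eq_some_iff]
  rw [if_neg (by omega), if_pos h2]
  exact ⟨_, rfl, rfl⟩

lemma findA_nat (h : List Int) (hw : pvWF h) (i : Nat) (hi : i < h.length) :
    ∀ fuel, i + 1 < fuel → ∃ h', findA fuel h (i : Int) = some (h', pvRoot h i) ∧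
      h'.length = h.length ∧ pvWF h' ∧
      ∀ j, j < h.length → pvRoot h' j = pvRoot h j := by
  induction i using Nat.strong_induction_on with
  | _ i IH =>
    intro fuel hfuel
    obtain ⟨f, rfl⟩ : ∃ f, fuel = f + 1 := ⟨fuel - 1, by omega⟩
    have hget : PySem.List.pyGet? h (i : Int) = some h[i] := by
      rw [PySem.List.pyGet?_natCast, List.getElem?_eq_getElem hi]
    simp only [findA, hget]
    by_cases hfix : h[i] = (i : Int)
    · rw [if_neg (by simp [hfix])]
      exact ⟨h, by rw [pvRoot_fix h i hi hfix, hfix], rfl, hw, fun j _ => rfl⟩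
    · rw [if_pos (by simp [hfix])]
      have hb := hw i hi
      have hlt : (h[i]).toNat < i := by omega
      have hcast : h[i] = ((h[i]).toNat : Int) := by omega
      obtain ⟨h1, heq1, hlen1, hw1, hpres1⟩ :=
        IH _ hlt (by omega) f (by omega)
      rw [hcast, heq1]
      dsimp only
      have hri : pvRoot h (h[i]).toNat = pvRoot h i := by
        rw [pvRoot_unfold h i hi, if_neg hfix,
          pvRootN_eq_root h hw _ (by omega) i hlt]
      have hset : PySem.List.pySet? h1 (i : Int) (pvRoot h (h[i]).toNat) =
          some (h1.set i (pvRoot h1 i)) := by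
        rw [PySem.List.pySet?_natCast h1 i _ (by omega), hri, hpres1 i hi]
      rw [hset]
      dsimp only
      obtain ⟨hw2, hpres2⟩ := pvSet_root h1 hw1 i (by omega)
      have hgot : PySem.List.pyGet? (h1.set i (pvRoot h1 i)) (i : Int) =
          some (pvRoot h1 i) := by
        rw [PySem.List.pyGet?_natCast,
          List.getElem?_eq_getElem (by simp; omega), List.getElem_set_self]
      rw [hgot]
      dsimp only
      refine ⟨_, ?_, by simp; omega, hw2, ?_⟩
      · rw [hpres1 i hi]
      · intro j hj
        rw [hpres2 j (by omega), hpres1 j hj]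

lemma findA_ok (h : List Int) (hw : pvWF h) (x : Int)
    (hx1 : -(h.length : Int) ≤ x) (hx2 : x < (h.length : Int))
    (fuel : Nat) (hf : h.length + 1 < fuel) :
    ∃ h', findA fuel h x = some (h', pvRoot h (pvNidx h.length x)) ∧
      h'.length = h.length ∧ pvWF h' ∧
      ∀ j, j < h.length → pvRoot h' j = pvRoot h j := by
  by_cases hneg : x < 0
  · -- negative index
    obtain ⟨f, rfl⟩ : ∃ f, fuel = f + 1 := ⟨fuel - 1, by omega⟩
    set k : Nat := (-x).toNat with hk
    have hxk : x = -(k : Int) := by omega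
    have hk1 : 0 < k := by omega
    have hk2 : k ≤ h.length := by omega
    set i : Nat := h.length - k with hidef
    have hieq : pvNidx h.length x = i := by
      unfold pvNidx; omega
    have hi : i < h.length := by omega
    have hget : PySem.List.pyGet? h x = some (h[i]'hi) := by
      rw [hxk, PySem.List.pyGet?_neg_natCast h k hk1 hk2,
        List.getElem?_eq_getElem (by omega)]
    simp only [findA, hget]
    have hb := hw i hi
    have hpx : ¬ (h[i]'hi = x) := by omega
    rw [if_pos (by simpa using hpx)]
    have hplt : (h[i]'hi).toNat ≤ i := by omega
    have hcast : h[i]'hi = ((h[i]'hi).toNat : Int) := by omega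
    obtain ⟨h1, heq1, hlen1, hw1, hpres1⟩ :=
      findA_nat h hw (h[i]'hi).toNat (by omega) f (by omega)
    rw [hcast, heq1]
    dsimp only
    have hri : pvRoot h (h[i]'hi).toNat = pvRoot h i := by
      by_cases hfix : h[i]'hi = (i : Int)
      · rw [show (h[i]'hi).toNat = i by omega]
      · rw [pvRoot_unfold h i hi, if_neg hfix,
          pvRootN_eq_root h hw _ (by omega) i (by omega)]
    have hset : PySem.List.pySet? h1 x (pvRoot h (h[i]'hi).toNat) =
        some (h1.set i (pvRoot h1 i)) := by
      rw [hxk, pvPySet_neg h1 k _ hk1 (by omega), hri, hpres1 i hi, hlen1]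
    rw [hset]
    dsimp only
    obtain ⟨hw2, hpres2⟩ := pvSet_root h1 hw1 i (by omega)
    have hgot : PySem.List.pyGet? (h1.set i (pvRoot h1 i)) x =
        some (pvRoot h1 i) := by
      rw [hxk, PySem.List.pyGet?_neg_natCast _ k hk1 (by simp; omega), List.length_set,
        show h1.length - k = i by omega]
      have : i < h1.length := by omega
      simp [this]
    rw [hgot]
    dsimp only
    refine ⟨_, ?_, by simp; omega, hw2, ?_⟩
    · rw [hieq, hpres1 i hi]
    · intro j hj
      rw [hpres2 j (by omega), hpres1 j hj]
  · have hx0 : x = ((x.toNat : Nat) : Int) := by omega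
    have hieq : pvNidx h.length x = x.toNat := by unfold pvNidx; omega
    rw [hieq, hx0]
    exact findA_nat h hw x.toNat (by omega) fuel (by omega)

lemma findA_root (h : List Int) (i : Nat) (hi : i < h.length)
    (hfix : h[i] = (i : Int)) (f : Nat) :
    findA (f+1) h (i : Int) = some (h, (i : Int)) := by
  have hget : PySem.List.pyGet? h (i : Int) = some h[i] := by
    rw [PySem.List.pyGet?_natCast, List.getElem?_eq_getElem hi]
  simp only [findA, hget]
  rw [if_neg (by simp [hfix]), hfix]

lemma unionA_ok (h : List Int) (hw : pvWF h) (rx ry : Nat) (hne : rx ≠ ry)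
    (hx : rx < h.length) (hy : ry < h.length)
    (hfx : h[rx] = (rx : Int)) (hfy : h[ry] = (ry : Int)) (f : Nat) :
    pvWF (h.set (max rx ry) ((min rx ry : Nat) : Int)) ∧
    unionA (f+1) h (rx : Int) (ry : Int) =
      some (h.set (max rx ry) ((min rx ry : Nat) : Int)) ∧
    ∀ j, j < h.length →
      pvRoot (h.set (max rx ry) ((min rx ry : Nat) : Int)) j =
        if pvRoot h j = ((max rx ry : Nat) : Int) then ((min rx ry : Nat) : Int)
        else pvRoot h j := by
  have hu : unionA (f+1) h (rx : Int) (ry : Int) =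
      some (h.set (max rx ry) ((min rx ry : Nat) : Int)) := by
    simp only [unionA, findA_root h rx hx hfx f, findA_root h ry hy hfy f]
    by_cases hlt : rx < ry
    · rw [if_pos (by exact_mod_cast hlt),
        PySem.List.pySet?_natCast h ry _ hy,
        show max rx ry = ry by omega, show min rx ry = rx by omega]
    · rw [if_neg (by exact_mod_cast hlt),
        PySem.List.pySet?_natCast h rx _ hx,
        show max rx ry = rx by omega, show min rx ry = ry by omega]
  by_cases hlt : rx < ry
  · rw [show max rx ry = ry by omega, show min rx ry = rx by omega] at hu ⊢
    obtain ⟨hw', hpres⟩ := pvSet_union h hw rx ry hlt hy (by simpa using hfx) hfy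
    exact ⟨hw', hu, hpres⟩
  · have hlt' : ry < rx := by omega
    rw [show max rx ry = rx by omega, show min rx ry = ry by omega] at hu ⊢
    obtain ⟨hw', hpres⟩ := pvSet_union h hw ry rx hlt' hx (by simpa using hfy) hfx
    exact ⟨hw', hu, hpres⟩

lemma pvRoot_eq_self_iff (h : List Int) (hw : pvWF h) (i : Nat) (hi : i < h.length) :
    pvRoot h i = (i : Int) ↔ h[i] = (i : Int) := by
  constructor
  · intro hr
    by_contra hfix
    have hb := hw i hi
    have hlt : (h[i]).toNat < i := by omega
    rw [pvRoot_unfold h i hi, if_neg hfix,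
      pvRootN_eq_root h hw _ (by omega) i hlt] at hr
    obtain ⟨h0, hle, _⟩ := pvRoot_spec h hw (h[i]).toNat (by omega)
    omega
  · exact pvRoot_fix h i hi

lemma pvGetEdge (l : List Int) (m : Nat) (hm : m < l.length) :
    PySem.List.pyGet? l (m : Int) = some (l.getD m 0) := by
  rw [PySem.List.pyGet?_natCast, List.getElem?_eq_getElem hm]
  simp [List.getD_eq_getElem?_getD, hm]

lemma pvGetNorm (xs : List Int) (x : Int) (h1 : -(xs.length : Int) ≤ x)
    (h2 : x < (xs.length : Int)) :
    PySem.List.pyGet? xs x = xs[pvNidx xs.length x]? := by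
  by_cases hneg : x < 0
  · have hk1 : 0 < (-x).toNat := by omega
    have hk2 : (-x).toNat ≤ xs.length := by omega
    have hn : pvNidx xs.length x = xs.length - (-x).toNat := by
      unfold pvNidx; rw [if_pos hneg]; omega
    rw [hn, show x = -(((-x).toNat : Nat) : Int) by omega,
      PySem.List.pyGet?_neg_natCast xs _ hk1 hk2]
    congr 2
    omega
  · have hn : pvNidx xs.length x = x.toNat := by
      unfold pvNidx; rw [if_neg hneg]
    rw [hn, show x = ((x.toNat : Nat) : Int) by omega, PySem.List.pyGet?_natCast]
    congr 2
    omega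

def pvEdgeOK (N : Nat) (l : List Int) : Prop :=
  3 ≤ l.length ∧ -(N : Int) ≤ l.getD 0 0 ∧ l.getD 0 0 < (N : Int) ∧
  -(N : Int) ≤ l.getD 1 0 ∧ l.getD 1 0 < (N : Int)

lemma loop_ok (edges : List (List Int)) :
    ∀ (h label : List Int) (res : Int), pvWF h →
      label = (List.range h.length).map (fun i => pvRoot h i) →
      (∀ l ∈ edges, pvEdgeOK h.length l) →
      ∃ h' r, edges.foldl stepA (some (h, res)) = some (h', r) ∧
        edges.foldl stepB (some (label, res)) =
          some ((List.range h.length).map (fun i => pvRoot h' i), r) ∧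
        h'.length = h.length ∧ pvWF h' := by
  induction edges with
  | nil =>
    intro h label res hw hlab _
    exact ⟨h, res, rfl, by rw [hlab]; simp, rfl, hw⟩
  | cons l es IH =>
    intro h label res hw hlab hedges
    obtain ⟨hlen3, hb0, hb0', hb1, hb1'⟩ := hedges l (List.mem_cons_self ..)
    have hlabLen : label.length = h.length := by rw [hlab]; simp
    -- the three reads of the edge
    have hg0 : PySem.List.pyGet? l (0 : Int) = some (l.getD 0 0) := by
      rw [show (0 : Int) = ((0 : Nat) : Int) from rfl]; exact pvGetEdge l 0 (by omega)
    have hg1 : PySem.List.pyGet? l (1 : Int) = some (l.getD 1 0) := by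
      rw [show (1 : Int) = ((1 : Nat) : Int) from rfl]; exact pvGetEdge l 1 (by omega)
    have hg2 : PySem.List.pyGet? l (2 : Int) = some (l.getD 2 0) := by
      rw [show (2 : Int) = ((2 : Nat) : Int) from rfl]; exact pvGetEdge l 2 (by omega)
    set x0 := l.getD 0 0 with hx0
    set y0 := l.getD 1 0 with hy0
    set z := l.getD 2 0 with hz
    set i0 := pvNidx h.length x0 with hi0
    set i1 := pvNidx h.length y0 with hi1
    have hi0lt : i0 < h.length := by rw [hi0]; unfold pvNidx; omega
    have hi1lt : i1 < h.length := by rw [hi1]; unfold pvNidx; omega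
    -- A's two finds
    obtain ⟨h1, heq1, hlen1, hw1, hpres1⟩ :=
      findA_ok h hw x0 hb0 hb0' (h.length + 2) (by omega)
    obtain ⟨h2, heq2, hlen2, hw2, hpres2⟩ :=
      findA_ok h1 hw1 y0 (by omega) (by omega) (h1.length + 2) (by omega)
    have hnidx1 : pvNidx h1.length y0 = i1 := by rw [hlen1, hi1]
    set x := pvRoot h i0 with hxdef
    set y := pvRoot h i1 with hydef
    have hy2 : pvRoot h1 (pvNidx h1.length y0) = y := by
      rw [hnidx1, hpres1 i1 hi1lt]
    -- B's two lookups
    have hlabGet : ∀ (w : Int), -(h.length : Int) ≤ w → w < (h.length : Int) →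
        PySem.List.pyGet? label w = some (pvRoot h (pvNidx h.length w)) := by
      intro w hw1 hw2
      rw [pvGetNorm label w (by omega) (by omega), hlabLen, hlab]
      have hlt : pvNidx h.length w < h.length := by unfold pvNidx; omega
      rw [List.getElem?_map, List.getElem?_range hlt]
      rfl
    have hBa : PySem.List.pyGet? label x0 = some x := by
      rw [hlabGet x0 hb0 hb0']
    have hBb : PySem.List.pyGet? label y0 = some y := by
      rw [hlabGet y0 hb1 hb1']
    have hlen2' : h2.length = h.length := hlen2.trans hlen1
    simp only [List.foldl_cons, stepA, stepB, hg0, hg1, hg2, heq1, hBa, hBb, heq2, hy2]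
    by_cases hxy : x = y
    · rw [if_pos hxy, if_pos hxy]
      have hlab2 : label = (List.range h2.length).map (fun i => pvRoot h2 i) := by
        rw [hlen2', hlab]
        refine List.map_congr_left ?_
        intro j hj
        have hj' : j < h.length := List.mem_range.mp hj
        rw [hpres2 j (by omega), hpres1 j hj']
      obtain ⟨h', r, hA', hB', hlen', hw'⟩ :=
        IH h2 label (res + z) hw2 hlab2 (by
          intro l' hl'
          rw [hlen2']
          exact hedges l' (List.mem_cons_of_mem _ hl'))
      rw [hlen2'] at hB'
      exact ⟨h', r, hA', hB', by omega, hw'⟩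
    · rw [if_neg hxy, if_neg hxy]
      -- x and y are roots of h2
      obtain ⟨hx0r, hxle, _⟩ := pvRoot_spec h hw i0 hi0lt
      obtain ⟨hy0r, hyle, _⟩ := pvRoot_spec h hw i1 hi1lt
      set rx := x.toNat with hrx
      set ry := y.toNat with hry
      have hxc : x = (rx : Int) := by omega
      have hyc : y = (ry : Int) := by omega
      have hrxlt : rx < h.length := by omega
      have hrylt : ry < h.length := by omega
      have hrootx : pvRoot h2 rx = (rx : Int) := by
        rw [hpres2 rx (by omega), hpres1 rx hrxlt, ← hxc, hxdef, pvRoot_fixnat h hw i0 hi0lt]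
      have hrooty : pvRoot h2 ry = (ry : Int) := by
        rw [hpres2 ry (by omega), hpres1 ry hrylt, ← hyc, hydef, pvRoot_fixnat h hw i1 hi1lt]
      have hfx2 : h2[rx]'(by omega) = (rx : Int) :=
        (pvRoot_eq_self_iff h2 hw2 rx (by omega)).mp hrootx
      have hfy2 : h2[ry]'(by omega) = (ry : Int) :=
        (pvRoot_eq_self_iff h2 hw2 ry (by omega)).mp hrooty
      have hrne : rx ≠ ry := by
        intro hc; exact hxy (by rw [hxc, hyc, hc])
      obtain ⟨hw3, hu, hpres3⟩ :=
        unionA_ok h2 hw2 rx ry hrne (by omega) (by omega) hfx2 hfy2 (h2.length + 1)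
      set h3 := h2.set (max rx ry) ((min rx ry : Nat) : Int) with hh3
      have hlen3' : h3.length = h.length := by rw [hh3]; simp [hlen2']
      rw [hxc, hyc, hu]
      have hmaxI : (if (rx : Int) < (ry : Int) then (ry : Int) else (rx : Int)) =
          ((max rx ry : Nat) : Int) := by split_ifs with hc <;> omega
      have hminI : (if (rx : Int) < (ry : Int) then (rx : Int) else (ry : Int)) =
          ((min rx ry : Nat) : Int) := by split_ifs with hc <;> omega
      have hlab3 : label.map (fun c =>
            if c = (if (rx : Int) < (ry : Int) then (ry : Int) else (rx : Int))
            then (if (rx : Int) < (ry : Int) then (rx : Int) else (ry : Int)) else c) =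
          (List.range h3.length).map (fun i => pvRoot h3 i) := by
        rw [hmaxI, hminI, hlen3', hlab, List.map_map]
        refine List.map_congr_left ?_
        intro j hj
        have hj' : j < h.length := List.mem_range.mp hj
        have := hpres3 j (by omega)
        rw [hpres2 j (by omega), hpres1 j hj'] at this
        simp only [Function.comp_apply, this]
      obtain ⟨h', r, hA', hB', hlen', hw'⟩ :=
        IH h3 _ res hw3 hlab3 (by
          intro l' hl'
          rw [hlen3']
          exact hedges l' (List.mem_cons_of_mem _ hl'))
      rw [hlen3'] at hB'
      exact ⟨h', r, hA', hB', by omega, hw'⟩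

theorem solution_eq_alt : ∀ (n : Int) (loads : List (List Int)), Pre_solution n loads →
    solution n loads = solution_alt n loads := by
  intro n loads hpre
  obtain ⟨hpre1, hpre2⟩ := hpre
  by_cases h0 : 0 ≤ n
  · set house := PySem.List.pyRange 0 n 1 with hhouse
    have hlen : house.length = n.toNat := by
      rw [hhouse, PySem.List.length_pyRange_one]
      simp
    have hget : ∀ i, (hi : i < house.length) → house[i] = (i : Int) := by
      intro i hi
      have h1 := PySem.List.getElem_pyRange_one 0 n i hi
      rw [zero_add] at h1
      exact h1
    have hwh : pvWF house := by
      intro i hi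
      rw [hget i hi]
      constructor <;> omega
    have hlab : house = (List.range house.length).map (fun i => pvRoot house i) := by
      refine List.ext_getElem (by simp) ?_
      intro i hi1 hi2
      rw [List.getElem_map, List.getElem_range,
        pvRoot_fix house i hi1 (hget i hi1), hget i hi1]
    have hedges : ∀ l ∈ PySem.List.sorted loads (fun s => PySem.List.pyGetD s 2 0) false,
        pvEdgeOK house.length l := by
      intro l hl
      obtain ⟨h3, hb0, hb0', hb1, hb1'⟩ := hpre2 l (by
        rwa [PySem.List.mem_sorted] at hl)
      have hcast : (house.length : Int) = n := by rw [hlen]; omega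
      exact ⟨h3, by omega, by omega, by omega, by omega⟩
    obtain ⟨h', r, hA, hB, _, _⟩ := loop_ok _ house house 0 hwh hlab hedges
    simp only [solution, solution_alt, ← hhouse, hA, hB]
  · have hloads : loads = [] := by tauto
    subst hloads
    have hnil : PySem.List.sorted ([] : List (List Int)) (fun s => PySem.List.pyGetD s 2 0) false = [] :=
      (PySem.List.sorted_eq_nil_iff _ _ _).mpr rfl
    simp only [solution, solution_alt, hnil, List.foldl_nil]

-- ===== VERDICT (by name: the statement is the Claim_ definition above) =====
theorem solution_spec : Claim_equal_solution := by
  intro n loads _dom hpre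
  unfold Spec_solution
  exact solution_eq_alt n loads hpre
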